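-- pv_equiv track=rewrite | github.com/minesh16/satellite-ground-station-tool | scripts/data_ingestion.py | determine_technology
-- ===== SOURCE A (Python) =====
-- def determine_technology(bands):
--     """Determine primary technology based on frequency bands"""
--     if any('NR' in band for band in bands):
--         return '5G'
--     elif any('LTE' in band for band in bands):
--         return '4G/LTE'
--     elif any('UMTS' in band or 'WCDMA' in band for band in bands):
--         return '3G'
--     elif any('GSM' in band for band in bands):
--         return '2G'
--     else:
--         return 'Unknown'
-- ===== SOURCE B (Python) =====
-- def determine_technology(bands):
--     """Determine primary technology based on frequency bands"""
--     tokens = [('NR', 4), ('LTE', 3), ('UMTS', 2), ('WCDMA', 2), ('GSM', 1)]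
--     labels = {4: '5G', 3: '4G/LTE', 2: '3G', 1: '2G'}
--     best = 0
--     for band in bands:
--         for tok, rank in tokens:
--             if tok in band and rank > best:
--                 best = rank
--     return labels.get(best, 'Unknown')
-- ===== Notes on version B (the rewrite author's own statement) =====
-- stated objective: alternative
-- what changed: Replaced the four priority-ordered any() scans over the whole list with a single pass that keeps a running best rank from a token->rank table and maps the final rank to its label.
import Mathlib
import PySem

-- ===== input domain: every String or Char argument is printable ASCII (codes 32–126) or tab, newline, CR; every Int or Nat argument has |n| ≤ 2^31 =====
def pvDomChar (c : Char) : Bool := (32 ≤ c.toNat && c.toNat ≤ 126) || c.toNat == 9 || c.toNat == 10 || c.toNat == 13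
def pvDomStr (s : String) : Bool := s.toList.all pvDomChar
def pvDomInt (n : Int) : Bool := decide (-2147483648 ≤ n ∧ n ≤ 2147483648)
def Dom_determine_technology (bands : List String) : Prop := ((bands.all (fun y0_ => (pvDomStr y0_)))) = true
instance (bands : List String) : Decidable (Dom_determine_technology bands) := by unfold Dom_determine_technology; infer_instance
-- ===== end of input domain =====

-- B replaces A's four priority-ordered any() scans by one pass keeping a running best rank
-- from a token->rank table, then maps the final rank to a label (objective: alternative).

-- ===== PORT A =====
def determine_technology (bands : List String) : String :=
  if bands.any (fun band => PySem.Str.isIn "NR" band) then "5G"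
  else if bands.any (fun band => PySem.Str.isIn "LTE" band) then "4G/LTE"
  else if bands.any (fun band => PySem.Str.isIn "UMTS" band || PySem.Str.isIn "WCDMA" band) then "3G"
  else if bands.any (fun band => PySem.Str.isIn "GSM" band) then "2G"
  else "Unknown"

-- ===== PORT B =====
def pvTokens : List (String × Nat) :=
  [("NR", 4), ("LTE", 3), ("UMTS", 2), ("WCDMA", 2), ("GSM", 1)]

def pvLabels : PySem.Dict Nat String :=
  PySem.Dict.ofList [(4, "5G"), (3, "4G/LTE"), (2, "3G"), (1, "2G")]

def determine_technology_alt (bands : List String) : String :=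
  let best := bands.foldl
    (fun best band =>
      pvTokens.foldl
        (fun best p => if PySem.Str.isIn p.1 band && decide (p.2 > best) then p.2 else best)
        best)
    0
  PySem.Dict.getD pvLabels best "Unknown"

-- ===== PRECONDITION & SPEC =====
def Spec_determine_technology (bands : List String) (out : String) : Prop := out = determine_technology_alt bands
instance (bands : List String) (out : String) : Decidable (Spec_determine_technology bands out) := by unfold Spec_determine_technology; infer_instance

-- ===== CLAIM (what is proved, stated in full; the proofs are below) =====
def Claim_equal_determine_technology : Prop := ∀ (bands : List String), Dom_determine_technology bands → Spec_determine_technology bands (determine_technology bands)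

-- ===== LEMMAS AND PROOFS =====

/-- The rank a single band contributes (the max rank of its matching tokens). -/
def pvTm (band : String) : Nat :=
  if PySem.Str.isIn "NR" band then 4
  else if PySem.Str.isIn "LTE" band then 3
  else if PySem.Str.isIn "UMTS" band || PySem.Str.isIn "WCDMA" band then 2
  else if PySem.Str.isIn "GSM" band then 1
  else 0

set_option maxHeartbeats 1000000 in
lemma inner_eq (best : Nat) (band : String) :
    pvTokens.foldl
      (fun best p => if PySem.Str.isIn p.1 band && decide (p.2 > best) then p.2 else best)
      best = max best (pvTm band) := by
  simp only [pvTokens, List.foldl]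
  unfold pvTm
  by_cases h1 : PySem.Str.isIn "NR" band <;>
  by_cases h2 : PySem.Str.isIn "LTE" band <;>
  by_cases h3 : PySem.Str.isIn "UMTS" band <;>
  by_cases h4 : PySem.Str.isIn "WCDMA" band <;>
  by_cases h5 : PySem.Str.isIn "GSM" band <;>
    simp only [h1, h2, h3, h4, h5, Bool.true_and, Bool.false_and, Bool.true_or, Bool.false_or,
      Bool.or_self, decide_eq_true_eq, eq_self_iff_true, if_true, Bool.false_eq_true, if_false] <;>
    (try split_ifs) <;> omega

lemma foldl_max_init (f : String → Nat) (l : List String) (b : Nat) :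
    l.foldl (fun a x => max a (f x)) b = max b (l.foldl (fun a x => max a (f x)) 0) := by
  induction l generalizing b with
  | nil => simp
  | cons x t ih =>
    simp only [List.foldl]
    rw [ih (max b (f x)), ih (max 0 (f x))]
    omega

set_option maxHeartbeats 1000000 in
lemma best_eq (bands : List String) :
    bands.foldl (fun a band => max a (pvTm band)) 0 =
      (if bands.any (fun band => PySem.Str.isIn "NR" band) then 4
       else if bands.any (fun band => PySem.Str.isIn "LTE" band) then 3
       else if bands.any (fun band => PySem.Str.isIn "UMTS" band || PySem.Str.isIn "WCDMA" band) then 2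
       else if bands.any (fun band => PySem.Str.isIn "GSM" band) then 1
       else 0) := by
  induction bands with
  | nil => simp
  | cons band t ih =>
    simp only [List.foldl, List.any_cons]
    rw [foldl_max_init, ih]
    unfold pvTm
    by_cases h1 : PySem.Str.isIn "NR" band <;>
    by_cases h2 : PySem.Str.isIn "LTE" band <;>
    by_cases h3 : PySem.Str.isIn "UMTS" band <;>
    by_cases h4 : PySem.Str.isIn "WCDMA" band <;>
    by_cases h5 : PySem.Str.isIn "GSM" band <;>
      simp only [h1, h2, h3, h4, h5, Bool.true_and, Bool.false_and, Bool.true_or, Bool.false_or,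
      Bool.or_self, decide_eq_true_eq, eq_self_iff_true, if_true, Bool.false_eq_true, if_false] <;>
      (try split_ifs) <;> omega

-- ===== VERDICT (by name: the statement is the Claim_ definition above) =====
theorem determine_technology_spec : Claim_equal_determine_technology := by
  intro bands _
  unfold Spec_determine_technology determine_technology determine_technology_alt
  have hstep : (fun (best : Nat) (band : String) =>
      pvTokens.foldl
        (fun best p => if PySem.Str.isIn p.1 band && decide (p.2 > best) then p.2 else best)
        best) = fun a band => max a (pvTm band) := by
    funext b band; exact inner_eq b band
  rw [hstep, best_eq]
  split_ifs <;> decide
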